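-- pv_equiv track=rewrite | github.com/jerryweihuajing/Post-Processing | 2D/Module/Dictionary.py | DictSortFromStart
-- ===== SOURCE A (Python) =====
-- def DictSlice(dictionary,start,stop):
--
--     keys=list(dictionary.keys())
--     values=list(dictionary.values())
--
--     new_dict={}
--
--     for i in range(start,stop):
--
--         new_dict[keys[i]]=values[i]
--
--     return new_dict
--
-- def DictSortFromStart(dictionary,start):
--
--     #两个字典切片
--     new_dict_1=DictSlice(dictionary,start,len(dictionary))
--     new_dict_2=DictSlice(dictionary,0,start)
--
--     #建立新的索引列表
--     keys=[]
--
--     for item in list(new_dict_1.items()):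
--
--         keys.append(item[0])
--
--     for item in list(new_dict_2.items()):
--
--         keys.append(item[0])
--
--     #建立新的值列表
--     values=[]
--
--     for item in list(new_dict_1.items()):
--
--         values.append(item[1])
--
--     for item in list(new_dict_2.items()):
--
--         values.append(item[1])
--
--     #建立新的字典
--     new_dict={}
--
--     for k in range(len(dictionary)):
--
--         new_dict[keys[k]]=values[k]
--
--     return new_dict
-- ===== SOURCE B (Python) =====
-- def DictSortFromStart(dictionary, start):
--     # single pass with modular indexing: element i of the result is item (start+i) mod n
--     items = list(dictionary.items())
--     n = len(items)
--     return dict(items[(start + i) % n] for i in range(n))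
-- ===== Notes on version B (the rewrite author's own statement) =====
-- stated objective: alternative
-- what changed: A builds two intermediate dicts by index loops over parallel key/value lists and reassembles them with a third index loop; B makes one pass over range(n) and places item (start+i) mod n directly, with no slices, sub-dicts or parallel lists.
import Mathlib
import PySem

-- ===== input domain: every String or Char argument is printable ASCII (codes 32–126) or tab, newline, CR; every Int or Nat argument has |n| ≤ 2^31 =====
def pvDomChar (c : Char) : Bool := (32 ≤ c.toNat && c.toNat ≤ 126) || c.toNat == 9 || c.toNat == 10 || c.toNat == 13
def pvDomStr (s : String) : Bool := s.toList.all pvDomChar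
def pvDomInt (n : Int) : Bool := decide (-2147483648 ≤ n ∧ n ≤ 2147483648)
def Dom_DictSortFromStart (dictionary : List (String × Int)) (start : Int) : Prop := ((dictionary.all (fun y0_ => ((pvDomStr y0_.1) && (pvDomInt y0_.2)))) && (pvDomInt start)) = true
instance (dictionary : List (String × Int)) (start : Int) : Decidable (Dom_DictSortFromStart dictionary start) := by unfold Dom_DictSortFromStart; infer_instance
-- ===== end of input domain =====

-- B places item (start+i) mod n directly in one pass over range(n), instead of A's two
-- index-loop dict slices, four append loops and index-based reassembly (objective: alternative).

-- ===== PORT A =====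
def pvDictSlice (dictionary : List (String × Int)) (start stop : Int) : PySem.Dict String Int :=
  let keys := dictionary.map Prod.fst
  let values := dictionary.map Prod.snd
  (PySem.List.pyRange start stop).foldl
    (fun nd i => nd.insert ((PySem.List.pyGet? keys i).getD "") ((PySem.List.pyGet? values i).getD 0))
    PySem.Dict.empty

def DictSortFromStart (dictionary : List (String × Int)) (start : Int) : List (String × Int) :=
  let nd1 := pvDictSlice dictionary start (dictionary.length : Int)
  let nd2 := pvDictSlice dictionary 0 start
  let keys := nd2.items.foldl (fun acc it => acc ++ [it.1]) (nd1.items.foldl (fun acc it => acc ++ [it.1]) [])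
  let values := nd2.items.foldl (fun acc it => acc ++ [it.2]) (nd1.items.foldl (fun acc it => acc ++ [it.2]) [])
  ((PySem.List.pyRange 0 (dictionary.length : Int)).foldl
    (fun nd k => nd.insert ((PySem.List.pyGet? keys k).getD "") ((PySem.List.pyGet? values k).getD 0))
    PySem.Dict.empty).items

-- ===== PORT B =====
def DictSortFromStart_alt (dictionary : List (String × Int)) (start : Int) : List (String × Int) :=
  let items := dictionary
  let n := (items.length : Int)
  (PySem.Dict.ofList ((PySem.List.pyRange 0 n).map
    (fun i => (PySem.List.pyGet? items (PySem.Int.mod (start + i) n)).getD ("", 0)))).items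

-- ===== PRECONDITION & SPEC =====
-- Pre_ excludes duplicate keys (the argument is a Python dict, whose keys are unique) and
-- start outside [-len, len], where A's positional indexing raises IndexError.
def Pre_DictSortFromStart (dictionary : List (String × Int)) (start : Int) : Prop :=
  (dictionary.map Prod.fst).Nodup ∧ -(dictionary.length : Int) ≤ start ∧ start ≤ (dictionary.length : Int)
instance (dictionary : List (String × Int)) (start : Int) : Decidable (Pre_DictSortFromStart dictionary start) := by unfold Pre_DictSortFromStart; infer_instance
def pvWitness_DictSortFromStart : (List (String × Int)) × Int := ([("a", 1), ("b", 2)], 1)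

def Spec_DictSortFromStart (dictionary : List (String × Int)) (start : Int) (out : List (String × Int)) : Prop := out = DictSortFromStart_alt dictionary start
instance (dictionary : List (String × Int)) (start : Int) (out : List (String × Int)) : Decidable (Spec_DictSortFromStart dictionary start out) := by unfold Spec_DictSortFromStart; infer_instance

-- ===== CLAIM (what is proved, stated in full; the proofs are below) =====
def Claim_equal_DictSortFromStart : Prop := ∀ (dictionary : List (String × Int)) (start : Int), Dom_DictSortFromStart dictionary start → Pre_DictSortFromStart dictionary start → Spec_DictSortFromStart dictionary start (DictSortFromStart dictionary start)

-- ===== LEMMAS AND PROOFS =====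

-- empty integer range
theorem pvRange_nil (a b : Int) (h : b ≤ a) : PySem.List.pyRange a b = [] := by
  simp [PySem.List.pyRange]; omega

-- the pair read at a nonnegative in-range index
theorem pvPairAt (e : List (String × Int)) (j : Nat) (hj : j < e.length) :
    (((PySem.List.pyGet? (e.map Prod.fst) (j : Int)).getD ""),
      ((PySem.List.pyGet? (e.map Prod.snd) (j : Int)).getD 0)) = e[j] := by
  simp [PySem.List.pyGet?_natCast, List.getElem?_map, List.getElem?_eq_getElem hj]

-- the pairs read along a nonnegative index range [a, b)
theorem pvMapPairs (e : List (String × Int)) (a b : Nat) (hb : b ≤ e.length) :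
    (PySem.List.pyRange (a : Int) (b : Int)).map
      (fun i => ((PySem.List.pyGet? (e.map Prod.fst) i).getD "",
                 (PySem.List.pyGet? (e.map Prod.snd) i).getD 0))
    = (e.drop a).take (b - a) := by
  induction b with
  | zero => rw [pvRange_nil _ _ (by exact_mod_cast Int.ofNat_nonneg a)]; simp
  | succ b ih =>
    by_cases hab : a ≤ b
    · have h1 : ((b : Int) + 1) = ((b + 1 : Nat) : Int) := by push_cast; ring
      rw [← h1, PySem.List.pyRange_one_succ_right (by exact_mod_cast hab)]
      rw [List.map_append, ih (by omega)]
      have hsub : b + 1 - a = (b - a) + 1 := by omega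
      rw [hsub, List.take_succ]
      have hbl : b < e.length := by omega
      have : (e.drop a)[b - a]? = some e[b] := by
        rw [List.getElem?_drop]
        have : a + (b - a) = b := by omega
        rw [this, List.getElem?_eq_getElem hbl]
      simp only [this, Option.toList_some, List.map_cons, List.map_nil, pvPairAt e b hbl]
    · rw [pvRange_nil _ _ (by exact_mod_cast by omega : ((b+1 : Nat) : Int) ≤ (a : Int))]
      have : b + 1 - a = 0 := by omega
      simp [this]

-- the pairs read along the negative index range [m - len, 0): the tail e.drop m
theorem pvMapPairsNeg (e : List (String × Int)) :
    ∀ (k m : Nat), m + k = e.length →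
    (PySem.List.pyRange ((m : Int) - (e.length : Int)) 0).map
      (fun i => ((PySem.List.pyGet? (e.map Prod.fst) i).getD "",
                 (PySem.List.pyGet? (e.map Prod.snd) i).getD 0))
    = e.drop m := by
  intro k
  induction k with
  | zero =>
    intro m hm
    rw [pvRange_nil _ _ (by omega)]
    simp [← hm]
  | succ k ih =>
    intro m hm
    have hmlt : m < e.length := by omega
    rw [PySem.List.pyRange_one_cons (by omega)]
    rw [List.map_cons]
    have hidx : PySem.List.pyIdx? e.length ((m : Int) - (e.length : Int)) = some m := by
      simp only [PySem.List.pyIdx?]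
      rw [if_neg (by omega), if_pos (by omega)]
      congr 1
      omega
    have hpair : (((PySem.List.pyGet? (e.map Prod.fst) ((m : Int) - (e.length : Int))).getD ""),
        ((PySem.List.pyGet? (e.map Prod.snd) ((m : Int) - (e.length : Int))).getD 0)) = e[m] := by
      simp [PySem.List.pyGet?, hidx, List.getElem?_map, List.getElem?_eq_getElem hmlt]
    have hstep : (m : Int) - (e.length : Int) + 1 = ((m + 1 : Nat) : Int) - (e.length : Int) := by
      push_cast; ring
    rw [hstep, ih (m + 1) (by omega)]
    rw [List.drop_eq_getElem_cons hmlt]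
    exact congrArg₂ _ hpair rfl

-- a fold inserting pairs read from an index range, rewritten as a fold over the pair list
theorem pvFoldInsertRange (e : List (String × Int)) (a b : Int) (nd : PySem.Dict String Int) :
    (PySem.List.pyRange a b).foldl
      (fun nd i => nd.insert ((PySem.List.pyGet? (e.map Prod.fst) i).getD "")
                             ((PySem.List.pyGet? (e.map Prod.snd) i).getD 0)) nd
    = ((PySem.List.pyRange a b).map
        (fun i => ((PySem.List.pyGet? (e.map Prod.fst) i).getD "",
                   (PySem.List.pyGet? (e.map Prod.snd) i).getD 0))).foldl
        (fun nd p => nd.insert p.1 p.2) nd := by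
  rw [List.foldl_map]

-- inserting a list of pairs with fresh distinct keys appends it to the items
theorem pvFoldFresh (l : List (String × Int)) (d : PySem.Dict String Int)
    (hnd : (l.map Prod.fst).Nodup) (hfresh : ∀ p ∈ l, d.contains p.1 = false) :
    (l.foldl (fun nd p => nd.insert p.1 p.2) d).items = d.items ++ l := by
  have := PySem.Dict.items_foldl_insert_fresh l Prod.fst Prod.snd d hfresh hnd
  simpa using this

-- replacing the (unique) pair at key k by itself is the identity
theorem pvReplaceId (l : List (String × Int)) (k : String) (v : Int)
    (hnd : (l.map Prod.fst).Nodup) (hmem : (k, v) ∈ l) :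
    l.map (fun p => if p.1 == k then (k, v) else p) = l := by
  induction l with
  | nil => simp at hmem
  | cons p t ih =>
    simp only [List.map, List.nodup_cons] at hnd
    rcases List.mem_cons.mp hmem with h | h
    · subst h
      simp only [List.map_cons, beq_self_eq_true, if_pos]
      congr 1
      have : ∀ q ∈ t, (fun p => if p.1 == k then (k, v) else p) q = q := by
        intro q hq
        have hq1 : q.1 ∈ t.map Prod.fst := List.mem_map_of_mem hq
        have : q.1 ≠ k := fun hqk => hnd.1 (hqk ▸ hq1)
        simp [this]
      rw [List.map_congr_left this]
      simp
    · have hpk : p.1 ≠ k := by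
        intro hpk
        exact hnd.1 (hpk ▸ (List.mem_map_of_mem h : (k, v).1 ∈ t.map Prod.fst))
      simp only [List.map_cons]
      rw [if_neg (by simpa using hpk)]
      rw [ih hnd.2 h]

-- inserting a pair already present (keys unique) leaves the dict unchanged
theorem pvInsertMem (d : PySem.Dict String Int) (k : String) (v : Int)
    (hnd : (d.items.map Prod.fst).Nodup) (hmem : (k, v) ∈ d.items) :
    d.insert k v = d := by
  have hc : d.contains k = true := by
    simp only [PySem.Dict.contains, List.any_eq_true]
    exact ⟨(k, v), hmem, by simp⟩
  apply PySem.Dict.ext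
  simp only [PySem.Dict.insert, hc, if_pos]
  exact pvReplaceId d.items k v hnd hmem

-- folding in pairs that are all already present is the identity
theorem pvFoldRedundant (l : List (String × Int)) (d : PySem.Dict String Int)
    (hnd : (d.items.map Prod.fst).Nodup) (hsub : ∀ p ∈ l, p ∈ d.items) :
    l.foldl (fun nd p => nd.insert p.1 p.2) d = d := by
  induction l with
  | nil => rfl
  | cons p t ih =>
    simp only [List.foldl_cons]
    rw [pvInsertMem d p.1 p.2 hnd (by simpa using hsub p (by simp))]
    exact ih (fun q hq => hsub q (by simp [hq]))

-- contains is false on the empty dict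
theorem pvContainsEmpty (k : String) : (PySem.Dict.empty : PySem.Dict String Int).contains k = false := by
  rfl

-- dict(l) for l with distinct keys has items l
theorem pvOfListItems (l : List (String × Int)) (hnd : (l.map Prod.fst).Nodup) :
    (PySem.Dict.ofList l).items = l := by
  have := pvFoldFresh l PySem.Dict.empty hnd (fun p _ => pvContainsEmpty p.1)
  simpa [PySem.Dict.ofList, PySem.Dict.update, PySem.Dict.empty] using this

-- keys of the rotation are still distinct
theorem pvRotNodup (d : List (String × Int)) (m : Nat) (hnd : (d.map Prod.fst).Nodup) :
    ((d.drop m ++ d.take m).map Prod.fst).Nodup := by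
  have hperm : (d.drop m ++ d.take m).Perm d := by
    calc (d.drop m ++ d.take m).Perm (d.take m ++ d.drop m) := List.perm_append_comm
    _ = d := by rw [List.take_append_drop]
  exact ((hperm.map Prod.fst).nodup_iff).mpr hnd

-- contains is false when the key is absent
theorem pvContainsFalse (D : PySem.Dict String Int) (k : String)
    (h : k ∉ D.items.map Prod.fst) : D.contains k = false := by
  simp only [PySem.Dict.contains, List.any_eq_false]
  intro p hp
  simp only [beq_iff_eq]
  exact fun hk => h (hk ▸ List.mem_map_of_mem hp)

-- keys of a dropped / taken segment stay distinct
theorem pvDropNodup (d : List (String × Int)) (a : Nat) (h : (d.map Prod.fst).Nodup) :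
    ((d.drop a).map Prod.fst).Nodup := by
  rw [List.map_drop]; exact h.sublist (List.drop_sublist _ _)

theorem pvTakeNodup (d : List (String × Int)) (a : Nat) (h : (d.map Prod.fst).Nodup) :
    ((d.take a).map Prod.fst).Nodup := by
  rw [List.map_take]; exact h.sublist (List.take_sublist _ _)

-- the pairs read along [0, b)
theorem pvMapPairs0 (e : List (String × Int)) (b : Nat) (hb : b ≤ e.length) :
    (PySem.List.pyRange 0 (b : Int)).map
      (fun i => ((PySem.List.pyGet? (e.map Prod.fst) i).getD "",
                 (PySem.List.pyGet? (e.map Prod.snd) i).getD 0))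
    = e.take b := by
  have h := pvMapPairs e 0 b hb
  simp only [Nat.cast_zero, List.drop_zero, Nat.sub_zero] at h
  exact h

-- the final reassembly fold over range(len) reproduces the pair list
theorem pvFinalFold (E : List (String × Int)) (n : Nat) (hlen : E.length = n)
    (hnd : (E.map Prod.fst).Nodup) :
    ((PySem.List.pyRange 0 (n : Int)).foldl
      (fun nd k => nd.insert ((PySem.List.pyGet? (E.map Prod.fst) k).getD "")
                             ((PySem.List.pyGet? (E.map Prod.snd) k).getD 0))
      PySem.Dict.empty).items = E := by
  rw [pvFoldInsertRange, pvMapPairs0 E n (by omega)]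
  rw [List.take_of_length_le (by omega)]
  rw [pvFoldFresh E PySem.Dict.empty hnd (fun p _ => pvContainsEmpty p.1)]
  rfl

-- DictSlice(d, a, len(d)) for a nonnegative start index
theorem pvSlice1 (d : List (String × Int)) (a : Nat) (hnd : (d.map Prod.fst).Nodup) :
    (pvDictSlice d (a : Int) (d.length : Int)).items = d.drop a := by
  unfold pvDictSlice
  rw [pvFoldInsertRange, pvMapPairs d a d.length (le_refl _)]
  rw [List.take_of_length_le (by simp)]
  rw [pvFoldFresh _ _ (pvDropNodup d a hnd) (fun p _ => pvContainsEmpty p.1)]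
  rfl

-- DictSlice(d, 0, a) for a nonnegative stop index
theorem pvSlice2 (d : List (String × Int)) (a : Nat) (ha : a ≤ d.length)
    (hnd : (d.map Prod.fst).Nodup) :
    (pvDictSlice d 0 (a : Int)).items = d.take a := by
  unfold pvDictSlice
  rw [pvFoldInsertRange, pvMapPairs0 d a ha]
  rw [pvFoldFresh _ _ (pvTakeNodup d a hnd) (fun p _ => pvContainsEmpty p.1)]
  rfl

-- DictSlice(d, 0, s) for a nonpositive stop: the empty range, hence the empty dict
theorem pvSlice2' (d : List (String × Int)) (s : Int) (hs : s ≤ 0) :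
    (pvDictSlice d 0 s).items = [] := by
  unfold pvDictSlice
  rw [pvRange_nil _ _ hs]
  rfl

-- DictSlice(d, m - len, len): negative wrap-around indices insert the tail, then
-- the whole list is re-inserted, yielding the rotation
theorem pvSliceNeg (d : List (String × Int)) (m : Nat) (hm : m ≤ d.length)
    (hnd : (d.map Prod.fst).Nodup) :
    (pvDictSlice d ((m : Int) - (d.length : Int)) (d.length : Int)).items
      = d.drop m ++ d.take m := by
  unfold pvDictSlice
  rw [pvFoldInsertRange]
  rw [PySem.List.pyRange_one_append ((m : Int) - (d.length : Int)) 0 (d.length : Int)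
    (by omega) (by omega)]
  rw [List.map_append, List.foldl_append]
  rw [pvMapPairsNeg d (d.length - m) m (by omega), pvMapPairs0 d d.length (le_refl _),
    List.take_length]
  set D0 := (d.drop m).foldl (fun nd p => nd.insert p.1 p.2) PySem.Dict.empty with hD0def
  have hD0 : D0.items = d.drop m := by
    rw [hD0def, pvFoldFresh _ _ (pvDropNodup d m hnd) (fun p _ => pvContainsEmpty p.1)]
    rfl
  have hstep : d.foldl (fun nd p => nd.insert p.1 p.2) D0
      = (d.drop m).foldl (fun nd p => nd.insert p.1 p.2)
          ((d.take m).foldl (fun nd p => nd.insert p.1 p.2) D0) := by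
    conv_lhs => rw [← List.take_append_drop m d]
    rw [List.foldl_append]
  have hD1 : ((d.take m).foldl (fun nd p => nd.insert p.1 p.2) D0).items
      = d.drop m ++ d.take m := by
    rw [pvFoldFresh _ _ (pvTakeNodup d m hnd) ?_, hD0]
    intro p hp
    apply pvContainsFalse
    rw [hD0]
    intro hk
    rw [← List.take_append_drop m d, List.map_append] at hnd
    exact (List.nodup_append.mp hnd).2.2 p.1 (List.mem_map_of_mem hp) p.1 hk rfl
  rw [hstep]
  rw [pvFoldRedundant _ _ (by rw [hD1]; exact pvRotNodup d m hnd)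
    (fun p hp => by rw [hD1]; exact List.mem_append_left _ hp)]
  exact hD1

-- length of the rotation
theorem pvRotLength (d : List (String × Int)) (m : Nat) :
    (d.drop m ++ d.take m).length = d.length := by
  simp [List.length_append]; omega

-- A computes the rotation at the clamped index
theorem pvA_eq (d : List (String × Int)) (start : Int)
    (hnd : (d.map Prod.fst).Nodup)
    (hlo : -(d.length : Int) ≤ start) (hhi : start ≤ (d.length : Int)) :
    DictSortFromStart d start
      = d.drop (PySem.List.clampIdx d.length start)
        ++ d.take (PySem.List.clampIdx d.length start) := by
  unfold DictSortFromStart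
  by_cases h0 : 0 ≤ start
  · have hM : PySem.List.clampIdx d.length start = start.toNat := by
      simp only [PySem.List.clampIdx]
      rw [if_neg (show ¬ start < 0 by omega)]
      have : start.toNat ≤ d.length := by omega
      omega
    rw [hM]
    rw [show start = ((start.toNat : Nat) : Int) from (Int.toNat_of_nonneg h0).symm]
    simp only [pvSlice1 d start.toNat hnd, pvSlice2 d start.toNat (by omega) hnd,
      PySem.List.foldl_append_singleton_eq_map, List.nil_append, ← List.map_append]
    exact pvFinalFold _ _ (pvRotLength d start.toNat) (pvRotNodup d start.toNat hnd)
  · have hmint : ((((d.length : Int) + start).toNat : Nat) : Int) = (d.length : Int) + start :=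
      Int.toNat_of_nonneg (by omega)
    set m : Nat := ((d.length : Int) + start).toNat with hm
    have hM : PySem.List.clampIdx d.length start = m := by
      simp only [PySem.List.clampIdx]
      rw [if_pos (show start < 0 by omega), if_neg (show ¬ ((d.length : Int) + start < 0) by omega)]
    have hmle : m ≤ d.length := by omega
    rw [hM]
    rw [show start = ((m : Nat) : Int) - (d.length : Int) by omega]
    simp only [pvSliceNeg d m hmle hnd,
      pvSlice2' d (((m : Nat) : Int) - (d.length : Int)) (by omega),
      PySem.List.foldl_append_singleton_eq_map, List.nil_append, List.map_nil,
      List.append_nil]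
    exact pvFinalFold _ _ (pvRotLength d m) (pvRotNodup d m hnd)

-- B's modular-index pass reads exactly the rotation d.drop m ++ d.take m
theorem pvModMap (d : List (String × Int)) (start : Int)
    (hlo : -(d.length : Int) ≤ start) (hhi : start ≤ (d.length : Int)) :
    (PySem.List.pyRange 0 (d.length : Int)).map
      (fun i => (PySem.List.pyGet? d (PySem.Int.mod (start + i) (d.length : Int))).getD ("", 0))
    = d.drop (PySem.List.clampIdx d.length start)
      ++ d.take (PySem.List.clampIdx d.length start) := by
  rcases Nat.eq_zero_or_pos d.length with hn | hn
  · have hd : d = [] := List.eq_nil_of_length_eq_zero hn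
    subst hd
    simp [pvRange_nil 0 0 (le_refl _)]
  · set n : Nat := d.length with hnd
    set m : Nat := PySem.List.clampIdx d.length start with hm
    have hmle : m ≤ n := by
      rw [hm, hnd]
      simp only [PySem.List.clampIdx]
      split_ifs <;> omega
    have hcong : (start : Int) % (n : Int) = (m : Int) % (n : Int) := by
      by_cases h0 : 0 ≤ start
      · have hM : m = start.toNat := by
          rw [hm]
          simp only [PySem.List.clampIdx]
          rw [if_neg (show ¬ start < 0 by omega)]
          omega
        rw [hM, Int.toNat_of_nonneg h0]
      · have hM : (m : Int) = (n : Int) + start := by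
          rw [hm]
          simp only [PySem.List.clampIdx]
          rw [if_pos (show start < 0 by omega),
            if_neg (show ¬ ((d.length : Int) + start < 0) by omega)]
          rw [Int.toNat_of_nonneg (by omega)]
        rw [hM, show (n : Int) + start = start + (n : Int) * 1 by ring,
          Int.add_mul_emod_self_left]
    apply List.ext_getElem
    · rw [List.length_map, PySem.List.length_pyRange_one]
      simp only [List.length_append, List.length_drop, List.length_take]
      omega
    · intro j hj1 hj2
      rw [List.getElem_map, PySem.List.getElem_pyRange_one]
      have hjn : j < n := by
        rw [List.length_map, PySem.List.length_pyRange_one] at hj1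
        omega
      have hmod : PySem.Int.mod (start + (0 + (j : Int))) (n : Int)
          = (((m + j) % n : Nat) : Int) := by
        rw [PySem.Int.mod_eq_emod_of_pos (by omega)]
        rw [show start + (0 + (j : Int)) = start + (j : Int) by ring]
        rw [Int.add_emod, hcong, ← Int.add_emod]
        push_cast
        rfl
      by_cases hcase : j < n - m
      · have hmod2 : (m + j) % n = m + j := Nat.mod_eq_of_lt (by omega)
        rw [hmod, hmod2]
        rw [PySem.List.pyGet?_natCast, List.getElem?_eq_getElem (show m + j < d.length by omega),
          Option.getD_some]
        rw [List.getElem_append_left (by simp only [List.length_drop]; omega)]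
        simp only [List.getElem_drop]
      · have hmod2 : (m + j) % n = m + j - n := by
          conv_lhs => rw [show m + j = (m + j - n) + n by omega]
          rw [Nat.add_mod_right, Nat.mod_eq_of_lt (by omega)]
        rw [hmod, hmod2]
        rw [PySem.List.pyGet?_natCast, List.getElem?_eq_getElem (show m + j - n < d.length by omega),
          Option.getD_some]
        rw [List.getElem_append_right (by simp only [List.length_drop]; omega)]
        simp only [List.getElem_take]
        congr 1
        simp only [List.length_drop]
        omega

-- B computes the same rotation
theorem pvB_eq (d : List (String × Int)) (start : Int) (hnd : (d.map Prod.fst).Nodup)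
    (hlo : -(d.length : Int) ≤ start) (hhi : start ≤ (d.length : Int)) :
    DictSortFromStart_alt d start
      = d.drop (PySem.List.clampIdx d.length start)
        ++ d.take (PySem.List.clampIdx d.length start) := by
  unfold DictSortFromStart_alt
  simp only []
  rw [pvModMap d start hlo hhi]
  exact pvOfListItems _ (pvRotNodup d _ hnd)

-- ===== VERDICT (by name: the statement is the Claim_ definition above) =====
theorem DictSortFromStart_spec : Claim_equal_DictSortFromStart := by
  intro d start _hdom hpre
  obtain ⟨hnd, hlo, hhi⟩ := hpre
  unfold Spec_DictSortFromStart
  rw [pvA_eq d start hnd hlo hhi, pvB_eq d start hnd hlo hhi]
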